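-- pv_equiv track=rewrite | github.com/Seeed-Studio/Linux_for_Tegra | bootloader/dtbcheck.py | __check_temp_values
-- ===== SOURCE A (Python) =====
-- __thermal_min_temp = -60000 # -60 C
--
-- __thermal_max_temp = 127000 # 127 C
--
-- def __is_temperature_valid(temp):
--     return (len(temp) == 1 and
--             temp[0] >= __thermal_min_temp and
--             temp[0] <= __thermal_max_temp)
--
-- def __check_temp_values(x):
--     if not all(__is_temperature_valid((y,)) for y in x):
--         return False
--
--     for i in range(0, 4):
--         tlo = x[i * 2]
--         thi = x[i * 2 + 1]
--         if tlo >= thi: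
--             return False
--         if i > 0:
--             if tlo <= tlo_prev:
--                 return False # no increase in low limit
--             if thi <= thi_prev:
--                 return False # no increase in high limit
--             if tlo >= thi_prev:
--                 return False # no overlap
--         tlo_prev = tlo
--         thi_prev = thi
--     tmin = x[0]
--     tmax = x[3 * 2 + 1]
--     tsafe_lo = x[4 * 2]
--     tsafe_hi = x[4 * 2 + 1]
--     if tsafe_lo != tmin:
--         return False
--     if tsafe_hi != tmax:
--         return False
--     return True
-- ===== SOURCE B (Python) =====
-- __thermal_min_temp = -60000 # -60 C
--
-- __thermal_max_temp = 127000 # 127 C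
--
-- def __check_temp_values(x):
--     if len(x) < 10:
--         return False
--     if any(y < __thermal_min_temp or y > __thermal_max_temp for y in x):
--         return False
--     pairs = [(x[2 * i], x[2 * i + 1]) for i in range(4)]
--     if any(lo >= hi for lo, hi in pairs):
--         return False
--     lows = [p[0] for p in pairs]
--     if any(b <= a for a, b in zip(lows, lows[1:])):
--         return False
--     highs = [p[1] for p in pairs]
--     if any(b <= a for a, b in zip(highs, highs[1:])):
--         return False
--     if any(q[0] >= p[1] for p, q in zip(pairs, pairs[1:])):
--         return False
--     return x[8] == x[0] and x[9] == x[7]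
-- ===== Notes on version B (the rewrite author's own statement) =====
-- stated objective: simpler
-- what changed: A's single stateful loop carrying tlo_prev/thi_prev with early returns is replaced by an explicit length guard, building the four (lo,hi) pairs once, and validating them in separate zip-based passes: each lo<hi, lows strictly increasing, highs strictly increasing, adjacent-pair overlap, then the two safe-range equalities.
import Mathlib
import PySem

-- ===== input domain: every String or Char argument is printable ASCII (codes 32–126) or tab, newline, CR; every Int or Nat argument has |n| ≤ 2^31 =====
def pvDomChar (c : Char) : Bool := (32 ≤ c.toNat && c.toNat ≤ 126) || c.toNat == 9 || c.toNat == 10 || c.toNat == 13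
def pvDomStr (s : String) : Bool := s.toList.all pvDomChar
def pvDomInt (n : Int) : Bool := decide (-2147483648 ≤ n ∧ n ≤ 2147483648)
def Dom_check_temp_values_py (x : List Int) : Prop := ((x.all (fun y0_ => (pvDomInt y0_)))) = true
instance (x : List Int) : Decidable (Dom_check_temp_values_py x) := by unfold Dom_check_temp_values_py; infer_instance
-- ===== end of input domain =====

-- B replaces A's single stateful loop by a length guard, a pair list built once, and
-- separate zip-based validation passes (objective: simpler decomposition, same cost).

-- ===== PORT A =====
def pvThermalMinTemp : Int := -60000
def pvThermalMaxTemp : Int := 127000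

def is_temperature_valid_py (temp : List Int) : Bool :=
  decide (temp.length = 1) &&
  decide (PySem.List.pyGetD temp 0 0 ≥ pvThermalMinTemp) &&
  decide (PySem.List.pyGetD temp 0 0 ≤ pvThermalMaxTemp)

def pvLoopA (x : List Int) : List Int → Int → Int → Bool
  | [], _, _ =>
      let tmin := PySem.List.pyGetD x 0 0
      let tmax := PySem.List.pyGetD x (3 * 2 + 1) 0
      let tsafe_lo := PySem.List.pyGetD x (4 * 2) 0
      let tsafe_hi := PySem.List.pyGetD x (4 * 2 + 1) 0
      if tsafe_lo ≠ tmin then false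
      else if tsafe_hi ≠ tmax then false
      else true
  | i :: rest, tlo_prev, thi_prev =>
      let tlo := PySem.List.pyGetD x (i * 2) 0
      let thi := PySem.List.pyGetD x (i * 2 + 1) 0
      if tlo ≥ thi then false
      else if decide (i > 0) && decide (tlo ≤ tlo_prev) then false
      else if decide (i > 0) && decide (thi ≤ thi_prev) then false
      else if decide (i > 0) && decide (tlo ≥ thi_prev) then false
      else pvLoopA x rest tlo thi

def check_temp_values_py (x : List Int) : Bool :=
  if !(x.all (fun y => is_temperature_valid_py [y])) then false
  else pvLoopA x (PySem.List.pyRange 0 4 1) 0 0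

-- ===== PORT B =====
def check_temp_values_py_alt (x : List Int) : Bool :=
  if decide (x.length < 10) then false
  else if x.any (fun y => decide (y < pvThermalMinTemp) || decide (y > pvThermalMaxTemp)) then false
  else
    let pairs := (PySem.List.pyRange 0 4 1).map
      (fun i => (PySem.List.pyGetD x (2 * i) 0, PySem.List.pyGetD x (2 * i + 1) 0))
    if pairs.any (fun p => decide (p.1 ≥ p.2)) then false
    else
      let lows := pairs.map Prod.fst
      if (lows.zip lows.tail).any (fun ab => decide (ab.2 ≤ ab.1)) then false
      else
        let highs := pairs.map Prod.snd
        if (highs.zip highs.tail).any (fun ab => decide (ab.2 ≤ ab.1)) then false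
        else if (pairs.zip pairs.tail).any (fun pq => decide (pq.2.1 ≥ pq.1.2)) then false
        else decide (PySem.List.pyGetD x 8 0 = PySem.List.pyGetD x 0 0) &&
             decide (PySem.List.pyGetD x 9 0 = PySem.List.pyGetD x 7 0)

-- ===== PRECONDITION & SPEC =====
-- pvFailAt x i: the pair check of A's loop iteration i fails, and both of its indices are
-- in range (a condition on the input's values at fixed positions, used to state Pre_).
def pvFailAt (x : List Int) (i : Nat) : Prop :=
  2 * i + 1 < x.length ∧
  (x.getD (2 * i + 1) 0 ≤ x.getD (2 * i) 0 ∨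
   (0 < i ∧ (x.getD (2 * i) 0 ≤ x.getD (2 * i - 2) 0 ∨
             x.getD (2 * i + 1) 0 ≤ x.getD (2 * i - 1) 0 ∨
             x.getD (2 * i - 1) 0 ≤ x.getD (2 * i) 0)))

-- Pre_ is exactly the set of inputs on which A returns: it excludes only the inputs where
-- A raises IndexError (lists shorter than 10 whose values are all in range and whose
-- checked prefix passes every ordering check, so the loop reads past the end).
def Pre_check_temp_values_py (x : List Int) : Prop :=
  (∃ y ∈ x, y < -60000 ∨ 127000 < y) ∨ 10 ≤ x.length ∨
  (x.length < 10 ∧ (pvFailAt x 0 ∨ pvFailAt x 1 ∨ pvFailAt x 2 ∨ pvFailAt x 3))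
instance (x : List Int) : Decidable (Pre_check_temp_values_py x) := by unfold Pre_check_temp_values_py pvFailAt; infer_instance
def pvWitness_check_temp_values_py : List Int := [0, 10, 9, 20, 19, 30, 29, 40, 0, 40]

def Spec_check_temp_values_py (x : List Int) (out : Bool) : Prop := out = check_temp_values_py_alt x
instance (x : List Int) (out : Bool) : Decidable (Spec_check_temp_values_py x out) := by unfold Spec_check_temp_values_py; infer_instance

-- ===== CLAIM (what is proved, stated in full; the proofs are below) =====
def Claim_equal_check_temp_values_py : Prop := ∀ (x : List Int), Dom_check_temp_values_py x → Pre_check_temp_values_py x → Spec_check_temp_values_py x (check_temp_values_py x)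
-- ===== LEMMAS AND PROOFS =====
theorem valid_singleton (y : Int) :
    is_temperature_valid_py [y] = (decide (-60000 ≤ y) && decide (y ≤ 127000)) := by
  simp [is_temperature_valid_py, PySem.List.pyGetD_zero_cons, pvThermalMinTemp, pvThermalMaxTemp]

-- ===== VERDICT (by name: the statement is the Claim_ definition above) =====
theorem check_temp_values_py_spec : Claim_equal_check_temp_values_py := by
  intro x hdom hpre
  unfold Spec_check_temp_values_py
  by_cases hv : ∀ y ∈ x, -60000 ≤ y ∧ y ≤ 127000
  · have hall : (x.all (fun y => is_temperature_valid_py [y])) = true := by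
      simp only [List.all_eq_true, valid_singleton]
      intro y hy
      have := hv y hy
      simp only [Bool.and_eq_true, decide_eq_true_eq]
      omega
    have hany : (x.any (fun y => decide (y < pvThermalMinTemp) || decide (y > pvThermalMaxTemp))) = false := by
      simp only [List.any_eq_false]
      intro y hy
      have := hv y hy
      simp [pvThermalMinTemp, pvThermalMaxTemp]
      omega
    have hr : PySem.List.pyRange 0 4 1 = [0, 1, 2, 3] := by decide
    rcases hpre with ⟨y, hy, h⟩ | hlen | ⟨hlen, hfail⟩
    · have := hv y hy; omega
    · clear hdom hv
      rcases x with _ | ⟨a0, x⟩; · simp at hlen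
      rcases x with _ | ⟨a1, x⟩; · simp at hlen
      rcases x with _ | ⟨a2, x⟩; · simp at hlen
      rcases x with _ | ⟨a3, x⟩; · simp at hlen
      rcases x with _ | ⟨a4, x⟩; · simp at hlen
      rcases x with _ | ⟨a5, x⟩; · simp at hlen
      rcases x with _ | ⟨a6, x⟩; · simp at hlen
      rcases x with _ | ⟨a7, x⟩; · simp at hlen
      rcases x with _ | ⟨a8, x⟩; · simp at hlen
      rcases x with _ | ⟨a9, x⟩; · simp at hlen
      rw [check_temp_values_py, check_temp_values_py_alt, hall, hany]
      simp only [hr, pvLoopA, List.map_cons, List.map_nil, List.tail_cons, List.zip_cons_cons,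
        List.zip_nil_right, List.any_cons, List.any_nil, List.length_cons]
      norm_num [PySem.List.pyGetD_ofNat']
      rw [Bool.eq_iff_iff]
      simp only [Bool.and_eq_true, Bool.not_eq_true', decide_eq_true_eq, decide_eq_false_iff_not,
        not_le]
      omega
    · clear hdom hv
      simp only [pvFailAt] at hfail
      rcases x with _ | ⟨a0, x⟩
      · simp at hfail
      rcases x with _ | ⟨a1, x⟩
      · simp at hfail
      rcases x with _ | ⟨a2, x⟩
      · simp at hfail
        all_goals rw [check_temp_values_py, check_temp_values_py_alt, hall]
        all_goals simp only [hr, pvLoopA, List.length_cons, List.length_nil]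
        all_goals norm_num [PySem.List.pyGetD_ofNat']
        all_goals omega
      rcases x with _ | ⟨a3, x⟩
      · simp at hfail
        all_goals rw [check_temp_values_py, check_temp_values_py_alt, hall]
        all_goals simp only [hr, pvLoopA, List.length_cons, List.length_nil]
        all_goals norm_num [PySem.List.pyGetD_ofNat']
        all_goals omega
      rcases x with _ | ⟨a4, x⟩
      · simp at hfail
        all_goals rw [check_temp_values_py, check_temp_values_py_alt, hall]
        all_goals simp only [hr, pvLoopA, List.length_cons, List.length_nil]
        all_goals norm_num [PySem.List.pyGetD_ofNat']
        all_goals omega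
      rcases x with _ | ⟨a5, x⟩
      · simp at hfail
        all_goals rw [check_temp_values_py, check_temp_values_py_alt, hall]
        all_goals simp only [hr, pvLoopA, List.length_cons, List.length_nil]
        all_goals norm_num [PySem.List.pyGetD_ofNat']
        all_goals omega
      rcases x with _ | ⟨a6, x⟩
      · simp at hfail
        all_goals rw [check_temp_values_py, check_temp_values_py_alt, hall]
        all_goals simp only [hr, pvLoopA, List.length_cons, List.length_nil]
        all_goals norm_num [PySem.List.pyGetD_ofNat']
        all_goals omega
      rcases x with _ | ⟨a7, x⟩
      · simp at hfail
        all_goals rw [check_temp_values_py, check_temp_values_py_alt, hall]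
        all_goals simp only [hr, pvLoopA, List.length_cons, List.length_nil]
        all_goals norm_num [PySem.List.pyGetD_ofNat']
        all_goals omega
      rcases x with _ | ⟨a8, x⟩
      · simp at hfail
        all_goals rw [check_temp_values_py, check_temp_values_py_alt, hall]
        all_goals simp only [hr, pvLoopA, List.length_cons, List.length_nil]
        all_goals norm_num [PySem.List.pyGetD_ofNat']
        all_goals omega
      rcases x with _ | ⟨a9, x⟩
      · simp at hfail
        all_goals rw [check_temp_values_py, check_temp_values_py_alt, hall]
        all_goals simp only [hr, pvLoopA, List.length_cons, List.length_nil]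
        all_goals norm_num [PySem.List.pyGetD_ofNat']
        all_goals omega
      simp only [List.length_cons] at hlen
      omega
  · push Not at hv
    obtain ⟨y, hy, hb⟩ := hv
    have hA : check_temp_values_py x = false := by
      unfold check_temp_values_py
      have hf : (x.all (fun y => is_temperature_valid_py [y])) = false := by
        simp only [List.all_eq_false]
        refine ⟨y, hy, ?_⟩
        simp [valid_singleton]
        omega
      simp [hf]
    have hB : check_temp_values_py_alt x = false := by
      unfold check_temp_values_py_alt
      by_cases hl : x.length < 10
      · simp [hl]
      · have ht : (x.any (fun y => decide (y < pvThermalMinTemp) || decide (y > pvThermalMaxTemp))) = true := by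
          simp only [List.any_eq_true]
          refine ⟨y, hy, ?_⟩
          simp [pvThermalMinTemp, pvThermalMaxTemp]
          omega
        simp [hl, ht]
    rw [hA, hB]
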